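-- pv_equiv track=rewrite | github.com/Wojnach/finance-analyzer | portfolio/analyze.py | _parse_watch_response
-- ===== SOURCE A (Python) =====
-- def _parse_watch_response(output, tickers):
--     """Parse Claude's watch response into per-ticker decisions.
--
--     Returns dict of {ticker: {"action": "HOLD"|"SELL", "reason": str}}
--     """
--     decisions = {}
--     lines = output.strip().splitlines()
--
--     for ticker in tickers:
--         # Look for "TICKER: HOLD" or "TICKER: SELL" pattern
--         # Strip markdown bold/heading markers (Claude often wraps in **bold**)
--         short = ticker.replace("-USD", "")
--         for i, line in enumerate(lines):
--             stripped = line.strip().lstrip("*#- ").rstrip("*")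
--             stripped_upper = stripped.upper()
--             if (stripped_upper.startswith(f"{ticker}:") or
--                     stripped_upper.startswith(f"{short}:")):
--                 action = "SELL" if "SELL" in stripped_upper else "HOLD"
--                 reason = ""
--                 # Look for REASON line after
--                 if i + 1 < len(lines):
--                     next_line = lines[i + 1].strip().lstrip("*#- ").rstrip("*")
--                     if next_line.upper().startswith("REASON:"):
--                         reason = next_line[7:].strip()
--                 decisions[ticker] = {"action": action, "reason": reason}
--                 break
--
--     # Extract overall market read
--     overall = ""
--     for line in lines:
--         stripped = line.strip().lstrip("*#- ").rstrip("*")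
--         if stripped.upper().startswith("OVERALL:"):
--             overall = stripped[8:].strip()
--             break
--
--     return decisions, overall
-- ===== SOURCE B (Python) =====
-- def _clean(line):
--     return line.strip().lstrip("*#- ").rstrip("*")
--
--
-- def _parse_watch_response(output, tickers):
--     """Single-pass variant: index every 'PREFIX:'-style line prefix once,
--     then answer each ticker (and OVERALL) by dict lookup."""
--     lines = output.strip().splitlines()
--     clean = [_clean(l) for l in lines]
--     up = [c.upper() for c in clean]
--     n = len(lines)
--
--     # first line index for every prefix that ends at a colon
--     first = {}
--     for i, u in enumerate(up):
--         for j, ch in enumerate(u):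
--             if ch == ':' and u[:j] not in first:
--                 first[u[:j]] = i
--
--     decisions = {}
--     for ticker in tickers:
--         short = ticker.replace("-USD", "")
--         i = min(first.get(ticker, n), first.get(short, n))
--         if i < n:
--             action = "SELL" if "SELL" in up[i] else "HOLD"
--             reason = ""
--             if i + 1 < n:
--                 nxt = clean[i + 1]
--                 if nxt.upper().startswith("REASON:"):
--                     reason = nxt[7:].strip()
--             decisions[ticker] = {"action": action, "reason": reason}
--
--     i = first.get("OVERALL", n)
--     overall = clean[i][8:].strip() if i < n else ""
--     return decisions, overall
-- ===== Notes on version B (the rewrite author's own statement) =====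
-- stated objective: faster
-- what changed: A rescans every line for each ticker; B makes one indexing pass that records the first line index for every colon-terminated uppercase line prefix in a dict, then answers each ticker (and OVERALL) by two dict lookups.
import Mathlib
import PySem

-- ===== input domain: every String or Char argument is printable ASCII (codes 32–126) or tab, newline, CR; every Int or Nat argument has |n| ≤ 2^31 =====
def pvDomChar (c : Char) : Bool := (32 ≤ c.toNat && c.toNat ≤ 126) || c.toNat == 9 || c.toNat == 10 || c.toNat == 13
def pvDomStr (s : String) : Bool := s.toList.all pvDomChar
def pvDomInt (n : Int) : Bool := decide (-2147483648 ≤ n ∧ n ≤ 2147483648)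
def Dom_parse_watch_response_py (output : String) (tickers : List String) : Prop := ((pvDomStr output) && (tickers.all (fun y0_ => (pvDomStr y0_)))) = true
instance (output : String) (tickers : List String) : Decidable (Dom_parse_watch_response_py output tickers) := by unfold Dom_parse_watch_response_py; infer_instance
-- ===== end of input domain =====

-- B replaces A's per-ticker rescans of all lines by one indexing pass (dict: colon-ended
-- uppercase line prefix → first line index) followed by dict lookups per ticker (objective: faster).

-- ===== PORT A =====
-- line.strip().lstrip("*#- ").rstrip("*")  — lstrip/rstrip with a char set ported by hand
-- (dropWhile membership from the left / from the right); exact on the ASCII domain.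
def pvClean (l : String) : List Char :=
  let s := PySem.Chars.strip l.toList
  let s := s.dropWhile (fun c => c == '*' || c == '#' || c == '-' || c == ' ')
  (s.reverse.dropWhile (fun c => c == '*')).reverse

-- A's inner 'for i, line in enumerate(lines): … break': first matching line; the
-- 'lines[i + 1]' of the REASON look-ahead is the head of the remaining tail.
def pvFind (t s : List Char) : List String → Option (String × String)
  | [] => none
  | l :: rest =>
    let su := PySem.Chars.upper (pvClean l)
    if PySem.Chars.startswith su (t ++ [':']) || PySem.Chars.startswith su (s ++ [':']) then
      let action := if PySem.Chars.isIn "SELL".toList su then "SELL" else "HOLD"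
      let reason :=
        match rest with
        | [] => ""
        | nl :: _ =>
          let n := pvClean nl
          if PySem.Chars.startswith (PySem.Chars.upper n) "REASON:".toList then
            String.ofList (PySem.Chars.strip (n.drop 7))
          else ""
      some (action, reason)
    else pvFind t s rest

-- A's trailing 'for line in lines: … break' extracting the OVERALL line
def pvOverall : List String → String
  | [] => ""
  | l :: rest =>
    let st := pvClean l
    if PySem.Chars.startswith (PySem.Chars.upper st) "OVERALL:".toList then
      String.ofList (PySem.Chars.strip (st.drop 8))
    else pvOverall rest

def parse_watch_response_py (output : String) (tickers : List String) :
    (List (String × List (String × String))) × String :=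
  let lines := PySem.Str.splitlines (PySem.Str.strip output)
  let decisions := tickers.foldl (fun d ticker =>
    let short := PySem.Str.replace ticker "-USD" ""
    match pvFind ticker.toList short.toList lines with
    | some (a, r) => d.insert ticker [("action", a), ("reason", r)]
    | none => d) (PySem.Dict.empty : PySem.Dict String (List (String × String)))
  (decisions.items, pvOverall lines)

-- ===== PORT B =====
-- B's inner 'for j, ch in enumerate(u): if ch==':' and u[:j] not in first: first[u[:j]]=i'
def pvIndexLine (u : List Char) (i : Nat) :
    Nat → List Char → PySem.Dict (List Char) Nat → PySem.Dict (List Char) Nat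
  | _, [], d => d
  | j, c :: rest, d =>
      pvIndexLine u i (j + 1) rest
        (if c == ':' && !(d.contains (u.take j)) then d.insert (u.take j) i else d)

-- B's outer 'for i, u in enumerate(up)'
def pvIndexAll : Nat → List (List Char) → PySem.Dict (List Char) Nat → PySem.Dict (List Char) Nat
  | _, [], d => d
  | i, u :: rest, d => pvIndexAll (i + 1) rest (pvIndexLine u i 0 u d)

def parse_watch_response_py_alt (output : String) (tickers : List String) :
    (List (String × List (String × String))) × String :=
  let lines := PySem.Str.splitlines (PySem.Str.strip output)
  let clean := lines.map pvClean
  let up := clean.map PySem.Chars.upper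
  let n := lines.length
  let first := pvIndexAll 0 up PySem.Dict.empty
  let decisions := tickers.foldl (fun d ticker =>
    let short := PySem.Str.replace ticker "-USD" ""
    let i := min (first.getD ticker.toList n) (first.getD short.toList n)
    if i < n then
      let u := up.getD i []
      let action := if PySem.Chars.isIn "SELL".toList u then "SELL" else "HOLD"
      let reason :=
        if i + 1 < n then
          let nxt := clean.getD (i + 1) []
          if PySem.Chars.startswith (PySem.Chars.upper nxt) "REASON:".toList then
            String.ofList (PySem.Chars.strip (nxt.drop 7))
          else ""
        else ""
      d.insert ticker [("action", action), ("reason", reason)]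
    else d) (PySem.Dict.empty : PySem.Dict String (List (String × String)))
  let io := first.getD "OVERALL".toList n
  let overall :=
    if io < n then String.ofList (PySem.Chars.strip ((clean.getD io []).drop 8)) else ""
  (decisions.items, overall)

-- ===== PRECONDITION & SPEC =====
def Spec_parse_watch_response_py (output : String) (tickers : List String) (out : (List (String × List (String × String))) × String) : Prop := out = parse_watch_response_py_alt output tickers
instance (output : String) (tickers : List String) (out : (List (String × List (String × String))) × String) : Decidable (Spec_parse_watch_response_py output tickers out) := by unfold Spec_parse_watch_response_py; infer_instance

-- ===== CLAIM (what is proved, stated in full; the proofs are below) =====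
def Claim_equal_parse_watch_response_py : Prop := ∀ (output : String) (tickers : List String), Dom_parse_watch_response_py output tickers → Spec_parse_watch_response_py output tickers (parse_watch_response_py output tickers)

-- ===== LEMMAS AND PROOFS =====

-- the predicate A scans with, per ticker pair (t, short)
def pvPred (t s : List Char) (l : String) : Bool :=
  PySem.Chars.startswith (PySem.Chars.upper (pvClean l)) (t ++ [':']) ||
  PySem.Chars.startswith (PySem.Chars.upper (pvClean l)) (s ++ [':'])

-- the (action, reason) payload both versions compute at a matched line index
def pvPayload (lines : List String) (i : Nat) : String × String :=
  ( if PySem.Chars.isIn "SELL".toList (PySem.Chars.upper (pvClean (lines.getD i ""))) then "SELL" else "HOLD",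
    if i + 1 < lines.length then
      (let nxt := pvClean (lines.getD (i + 1) "")
       if PySem.Chars.startswith (PySem.Chars.upper nxt) "REASON:".toList then
         String.ofList (PySem.Chars.strip (nxt.drop 7))
       else "")
    else "" )

-- "∃ colon at position m ≥ j in u with u.take m = k", the invariant of pvIndexLine
def pvKeyFrom (u : List Char) : Nat → List Char → List Char → Bool
  | _, [], _ => false
  | j, c :: rest, k => (c == ':' && u.take j == k) || pvKeyFrom u (j + 1) rest k

theorem pvPayload_cons (l : String) (rest : List String) (i : Nat) :
    pvPayload (l :: rest) (i + 1) = pvPayload rest i := by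
  simp [pvPayload]

theorem pvFind_eq (t s : List Char) (lines : List String) :
    pvFind t s lines =
      match lines.findIdx? (pvPred t s) with
      | none => none
      | some i => some (pvPayload lines i) := by
  induction lines with
  | nil => simp [pvFind]
  | cons l rest ih =>
    rw [List.findIdx?_cons]
    by_cases h : pvPred t s l = true
    · rw [if_pos h]
      unfold pvFind
      rw [if_pos (by simpa [pvPred] using h)]
      cases rest with
      | nil => simp [pvPayload]
      | cons nl r => simp [pvPayload]
    · rw [if_neg h]
      unfold pvFind
      rw [if_neg (by simpa [pvPred] using h)]
      rw [ih]
      cases hf : rest.findIdx? (pvPred t s) with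
      | none => simp
      | some i => simp [pvPayload_cons]

theorem pvIndexLine_get? (u : List Char) (i : Nat) :
    ∀ (rest : List Char) (j : Nat) (d : PySem.Dict (List Char) Nat) (k : List Char),
      (pvIndexLine u i j rest d).get? k =
        if (d.get? k).isSome then d.get? k
        else if pvKeyFrom u j rest k then some i else none := by
  intro rest
  induction rest with
  | nil => intro j d k; simp [pvIndexLine, pvKeyFrom]
  | cons c rest ih =>
    intro j d k
    unfold pvIndexLine
    rw [ih]
    show _ = if (d.get? k).isSome then d.get? k
             else if ((c == ':' && u.take j == k) || pvKeyFrom u (j + 1) rest k) then some i else none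
    by_cases hk : u.take j = k
    · have hbeq : (u.take j == k) = true := by simpa using hk
      cases hd : d.get? k with
      | some v =>
        have hc : d.contains (u.take j) = true := by
          rw [PySem.Dict.contains_eq_isSome_get?, hk, hd]; rfl
        simp [hc, hd]
      | none =>
        have hc : d.contains (u.take j) = false := by
          rw [PySem.Dict.contains_eq_isSome_get?, hk, hd]; rfl
        by_cases hcc : c = ':'
        · have hins : (d.insert (u.take j) i).get? k = some i := by
            rw [hk]; exact PySem.Dict.get?_insert_self d k i
          simp [hcc, hc, hins, hbeq]
        · have hccb : (c == ':') = false := by simp [hcc]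
          simp [hccb, hd]
    · have hne : k ≠ u.take j := fun h => hk h.symm
      have hg : (if c == ':' && !d.contains (u.take j) then d.insert (u.take j) i else d).get? k
          = d.get? k := by
        split
        · exact PySem.Dict.get?_insert_of_ne d i hne
        · rfl
      rw [hg]
      have : (u.take j == k) = false := by simp [hk]
      simp [this]

theorem pvKeyFrom_iff (u : List Char) :
    ∀ (rest : List Char) (j : Nat), u.drop j = rest → ∀ (k : List Char),
      (pvKeyFrom u j rest k = true ↔ ∃ m, j ≤ m ∧ u[m]? = some ':' ∧ u.take m = k) := by
  intro rest
  induction rest with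
  | nil =>
    intro j hj k
    have hlen : u.length ≤ j := by
      by_contra h
      have := List.drop_eq_nil_iff.mp hj
      omega
    simp only [pvKeyFrom]
    constructor
    · intro h; exact absurd h (by simp)
    · rintro ⟨m, hm, hg, -⟩
      have : m < u.length := (List.getElem?_eq_some_iff.mp hg).1
      omega
  | cons c rest ih =>
    intro j hj k
    have hjlt : j < u.length := by
      by_contra h
      have : u.drop j = [] := List.drop_eq_nil_iff.mpr (by omega)
      rw [this] at hj; exact (List.cons_ne_nil c rest) hj.symm
    have hthis := List.getElem_cons_drop hjlt
    rw [hj] at hthis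
    injection hthis with h1 hdrop
    have huj : u[j]? = some c := by rw [List.getElem?_eq_getElem hjlt, h1]
    simp only [pvKeyFrom, Bool.or_eq_true, Bool.and_eq_true, beq_iff_eq]
    rw [ih (j + 1) hdrop k]
    constructor
    · rintro (⟨hc, ht⟩ | ⟨m, hm, hg, ht⟩)
      · exact ⟨j, le_refl j, by rw [huj, hc], ht⟩
      · exact ⟨m, by omega, hg, ht⟩
    · rintro ⟨m, hm, hg, ht⟩
      rcases Nat.eq_or_lt_of_le hm with heq | hlt
      · subst heq
        rw [huj] at hg
        refine Or.inl ⟨?_, ht⟩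
        injection hg
      · exact Or.inr ⟨m, by omega, hg, ht⟩

theorem pvKeyFrom_eq_startswith (u k : List Char) :
    pvKeyFrom u 0 u k = PySem.Chars.startswith u (k ++ [':']) := by
  rw [Bool.eq_iff_iff]
  rw [pvKeyFrom_iff u u 0 (by simp) k, PySem.Chars.startswith_iff]
  constructor
  · rintro ⟨m, -, hg, ht⟩
    have hm : m < u.length := (List.getElem?_eq_some_iff.mp hg).1
    have hlenk : k.length = m := by
      have := congrArg List.length ht
      simp at this
      omega
    have : u = u.take m ++ u.drop m := (List.take_append_drop m u).symm
    rw [ht] at this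
    have hdrop : u.drop m = ':' :: u.drop (m + 1) := by
      have h1 := List.getElem_cons_drop hm
      have h2 : u[m] = ':' := (List.getElem?_eq_some_iff.mp hg).2
      rw [h2] at h1; exact h1.symm
    refine ⟨u.drop (m + 1), ?_⟩
    rw [← ht, List.append_assoc, List.singleton_append, ← hdrop]
    exact List.take_append_drop m u
  · rintro ⟨t, ht⟩
    refine ⟨k.length, Nat.zero_le _, ?_, ?_⟩
    · rw [← ht, List.append_assoc, List.getElem?_append_right (le_refl k.length)]
      simp
    · rw [← ht, List.append_assoc, List.take_left]

theorem pvIndexAll_get? :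
    ∀ (ups : List (List Char)) (i : Nat) (d : PySem.Dict (List Char) Nat) (k : List Char),
      (pvIndexAll i ups d).get? k =
        if (d.get? k).isSome then d.get? k
        else (ups.findIdx? (fun u => PySem.Chars.startswith u (k ++ [':']))).map (· + i) := by
  intro ups
  induction ups with
  | nil => intro i d k; simp [pvIndexAll]
  | cons u rest ih =>
    intro i d k
    unfold pvIndexAll
    rw [ih, pvIndexLine_get?]
    rw [List.findIdx?_cons]
    cases hd : d.get? k with
    | some v => simp
    | none =>
      rw [pvKeyFrom_eq_startswith]
      by_cases hs : PySem.Chars.startswith u (k ++ [':']) = true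
      · simp [hs]
      · simp only [hs, if_neg, Bool.false_eq_true, not_false_eq_true,
          Option.isSome_none]
        cases hf : rest.findIdx? (fun u => PySem.Chars.startswith u (k ++ [':'])) with
        | none => simp
        | some m => simp; omega

theorem pvMin_findIdx {α : Type} (p q : α → Bool) (ls : List α) :
    min ((ls.findIdx? p).getD ls.length) ((ls.findIdx? q).getD ls.length) =
      (ls.findIdx? (fun x => p x || q x)).getD ls.length := by
  have hmap : ∀ (o : Option Nat) (n : Nat), (o.map (· + 1)).getD (n + 1) = o.getD n + 1 := by
    intro o n; cases o <;> simp
  induction ls with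
  | nil => simp
  | cons x ls ih =>
    rw [List.findIdx?_cons, List.findIdx?_cons, List.findIdx?_cons]
    by_cases hp : p x = true <;> by_cases hq : q x = true <;>
      simp only [hp, hq, if_pos, if_neg, Bool.or_true, Bool.or_false,
        Bool.false_eq_true, not_false_eq_true, List.length_cons, hmap,
        Option.getD_some] <;> omega

theorem getD_map_of_lt {α β : Type} (f : α → β) (l : List α) (i : Nat) (d : β) (e : α)
    (h : i < l.length) : (l.map f).getD i d = f (l.getD i e) := by
  simp [List.getD_eq_getElem?_getD, List.getElem?_map, List.getElem?_eq_getElem h]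

theorem pvFirst_getD (lines : List String) (k : List Char) :
    (pvIndexAll 0 ((lines.map pvClean).map PySem.Chars.upper) PySem.Dict.empty).getD k lines.length
      = (lines.findIdx? (fun l =>
          PySem.Chars.startswith (PySem.Chars.upper (pvClean l)) (k ++ [':']))).getD lines.length := by
  rw [PySem.Dict.getD_eq_get?_getD, pvIndexAll_get?]
  rw [List.map_map, List.findIdx?_map]
  have hid : ∀ (o : Option Nat), o.map (· + 0) = o := by intro o; cases o <;> simp
  simp [PySem.Dict.get?_empty, Function.comp_def]

theorem pvOverall_eq (lines : List String) :
    pvOverall lines =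
      match lines.findIdx? (fun l =>
          PySem.Chars.startswith (PySem.Chars.upper (pvClean l)) "OVERALL:".toList) with
      | none => ""
      | some i => String.ofList (PySem.Chars.strip ((pvClean (lines.getD i "")).drop 8)) := by
  induction lines with
  | nil => simp [pvOverall]
  | cons l rest ih =>
    rw [List.findIdx?_cons]
    by_cases h : PySem.Chars.startswith (PySem.Chars.upper (pvClean l)) "OVERALL:".toList = true
    · rw [if_pos h]; unfold pvOverall; rw [if_pos h]; simp
    · rw [if_neg h]; unfold pvOverall; rw [if_neg h, ih]
      cases hf : rest.findIdx? (fun l =>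
          PySem.Chars.startswith (PySem.Chars.upper (pvClean l)) "OVERALL:".toList) with
      | none => simp
      | some i => simp

theorem pvStep_eq (lines : List String) (d : PySem.Dict String (List (String × String)))
    (ticker : String) :
    (match pvFind ticker.toList (PySem.Str.replace ticker "-USD" "").toList lines with
     | some (a, r) => d.insert ticker [("action", a), ("reason", r)]
     | none => d)
    =
    (if min
        ((pvIndexAll 0 ((lines.map pvClean).map PySem.Chars.upper) PySem.Dict.empty).getD
          ticker.toList lines.length)
        ((pvIndexAll 0 ((lines.map pvClean).map PySem.Chars.upper) PySem.Dict.empty).getD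
          (PySem.Str.replace ticker "-USD" "").toList lines.length) < lines.length then
      d.insert ticker
        [("action",
          if PySem.Chars.isIn "SELL".toList
              (((lines.map pvClean).map PySem.Chars.upper).getD
                (min
                  ((pvIndexAll 0 ((lines.map pvClean).map PySem.Chars.upper) PySem.Dict.empty).getD
                    ticker.toList lines.length)
                  ((pvIndexAll 0 ((lines.map pvClean).map PySem.Chars.upper) PySem.Dict.empty).getD
                    (PySem.Str.replace ticker "-USD" "").toList lines.length)) []) then "SELL"
          else "HOLD"),
         ("reason",
          if (min
                ((pvIndexAll 0 ((lines.map pvClean).map PySem.Chars.upper) PySem.Dict.empty).getD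
                  ticker.toList lines.length)
                ((pvIndexAll 0 ((lines.map pvClean).map PySem.Chars.upper) PySem.Dict.empty).getD
                  (PySem.Str.replace ticker "-USD" "").toList lines.length)) + 1 < lines.length then
            (if PySem.Chars.startswith
                (PySem.Chars.upper
                  ((lines.map pvClean).getD
                    ((min
                        ((pvIndexAll 0 ((lines.map pvClean).map PySem.Chars.upper)
                            PySem.Dict.empty).getD ticker.toList lines.length)
                        ((pvIndexAll 0 ((lines.map pvClean).map PySem.Chars.upper)
                            PySem.Dict.empty).getD (PySem.Str.replace ticker "-USD" "").toList
                          lines.length)) + 1) []))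
                "REASON:".toList then
              String.ofList (PySem.Chars.strip
                (((lines.map pvClean).getD
                  ((min
                      ((pvIndexAll 0 ((lines.map pvClean).map PySem.Chars.upper)
                          PySem.Dict.empty).getD ticker.toList lines.length)
                      ((pvIndexAll 0 ((lines.map pvClean).map PySem.Chars.upper)
                          PySem.Dict.empty).getD (PySem.Str.replace ticker "-USD" "").toList
                        lines.length)) + 1) []).drop 7))
            else "")
          else "")]
    else d) := by
  rw [pvFind_eq, pvFirst_getD, pvFirst_getD, pvMin_findIdx]
  cases hf : lines.findIdx? (pvPred ticker.toList (PySem.Str.replace ticker "-USD" "").toList) with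
  | none =>
    have hp : lines.findIdx? (fun x =>
        PySem.Chars.startswith (PySem.Chars.upper (pvClean x)) (ticker.toList ++ [':']) ||
        PySem.Chars.startswith (PySem.Chars.upper (pvClean x))
          ((PySem.Str.replace ticker "-USD" "").toList ++ [':'])) = none := hf
    rw [hp]
    simp
  | some i =>
    have hp : lines.findIdx? (fun x =>
        PySem.Chars.startswith (PySem.Chars.upper (pvClean x)) (ticker.toList ++ [':']) ||
        PySem.Chars.startswith (PySem.Chars.upper (pvClean x))
          ((PySem.Str.replace ticker "-USD" "").toList ++ [':'])) = some i := hf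
    rw [hp]
    have hi : i < lines.length := by
      have := List.findIdx?_eq_some_iff_findIdx_eq.mp hf
      omega
    simp only [Option.getD_some, if_pos hi, pvPayload]
    have hup : ((lines.map pvClean).map PySem.Chars.upper).getD i []
        = PySem.Chars.upper (pvClean (lines.getD i "")) := by
      rw [getD_map_of_lt _ _ _ _ [] (by simpa using hi), getD_map_of_lt _ _ _ _ "" hi]
    by_cases hnext : i + 1 < lines.length
    · have hcl : (lines.map pvClean).getD (i + 1) [] = pvClean (lines.getD (i + 1) "") := by
        rw [getD_map_of_lt _ _ _ _ "" hnext]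
      simp only [hup, hcl]
    · simp only [hup]
      simp [hnext]

-- ===== VERDICT (by name: the statement is the Claim_ definition above) =====
set_option maxHeartbeats 1000000 in
theorem parse_watch_response_py_spec : Claim_equal_parse_watch_response_py := by
  intro output tickers _
  show parse_watch_response_py output tickers = parse_watch_response_py_alt output tickers
  unfold parse_watch_response_py parse_watch_response_py_alt
  refine congrArg₂ Prod.mk ?_ ?_
  · exact congrArg PySem.Dict.items (PySem.List.foldl_congr_mem tickers _ _ _
      (fun acc t _ => pvStep_eq (PySem.Str.splitlines (PySem.Str.strip output)) acc t))
  · rw [pvOverall_eq]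
    have hkey : ("OVERALL".toList ++ [':']) = "OVERALL:".toList := by decide
    have h1 := pvFirst_getD (PySem.Str.splitlines (PySem.Str.strip output)) "OVERALL".toList
    rw [hkey] at h1
    simp only [h1]
    cases hf : (PySem.Str.splitlines (PySem.Str.strip output)).findIdx? (fun l =>
        PySem.Chars.startswith (PySem.Chars.upper (pvClean l)) "OVERALL:".toList) with
    | none => simp
    | some i =>
      have hi : i < (PySem.Str.splitlines (PySem.Str.strip output)).length := by
        have := List.findIdx?_eq_some_iff_findIdx_eq.mp hf
        omega
      simp only [Option.getD_some, if_pos hi]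
      rw [getD_map_of_lt _ _ _ _ "" hi]
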